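-- pv_equiv track=rewrite | github.com/rnrudxo2872/algorithm | 005.py | solution
-- ===== SOURCE A (Python) =====
-- def solution(n, times):
--     times.sort()
--     left = 0
--     right = times[-1] * n
--
--     while left < right:
--         mid = int((left+right) / 2)
--
--         sumNum = 0
--         for time in times:
--             sumNum += int(mid / time)
--
--         if sumNum >= n:
--             right = mid
--         else:
--             left = mid + 1
--     return left
-- ===== SOURCE B (Python) =====
-- def _merge(a, b):
--     """Merge two leftist min-heaps keyed on finish time.
--
--     A node is a tuple (rank, finish, step, left, right); an empty heap is None.
--     """
--     if a is None:
--         return b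
--     if b is None:
--         return a
--     if b[1] < a[1]:
--         a, b = b, a
--     left = a[3]
--     right = _merge(a[4], b)
--     rl = left[0] if left is not None else 0
--     rr = right[0] if right is not None else 0
--     if rl < rr:
--         return (rl + 1, a[1], a[2], right, left)
--     return (rr + 1, a[1], a[2], left, right)
--
--
-- def solution(n, times):
--     # Simulate the booths: a leftist min-heap holds each booth's next finish
--     # time; pop the earliest finish n times, re-inserting the booth with its
--     # following finish time; the n-th popped finish time is the answer.
--     times.sort()
--     if n <= 0:
--         return 0
--     heap = None
--     for t in times:
--         heap = _merge(heap, (1, t, t, None, None))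
--     ans = 0
--     for _ in range(n):
--         _, finish, step, left, right = heap
--         ans = finish
--         heap = _merge(_merge(left, right), (1, finish + step, step, None, None))
--     return ans
-- ===== Notes on version B (the rewrite author's own statement) =====
-- stated objective: alternative
-- what changed: Replaces A's binary search over the answer (recounting sum(t//x) at each probe) with a direct event simulation: a hand-rolled leftist min-heap holds each booth's next finish time, the earliest finish is popped n times (re-inserting the booth with its next multiple), and the n-th popped finish is the answer.
-- outside the precondition, e.g. on solution(2, [-3, -1]): A returns 0, B returns -6; on solution(4, [12, -4, -16]): A returns 48, B returns -64; on solution(-32, [-17, -19, -16]): A returns 512, B returns 0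
import Mathlib
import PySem

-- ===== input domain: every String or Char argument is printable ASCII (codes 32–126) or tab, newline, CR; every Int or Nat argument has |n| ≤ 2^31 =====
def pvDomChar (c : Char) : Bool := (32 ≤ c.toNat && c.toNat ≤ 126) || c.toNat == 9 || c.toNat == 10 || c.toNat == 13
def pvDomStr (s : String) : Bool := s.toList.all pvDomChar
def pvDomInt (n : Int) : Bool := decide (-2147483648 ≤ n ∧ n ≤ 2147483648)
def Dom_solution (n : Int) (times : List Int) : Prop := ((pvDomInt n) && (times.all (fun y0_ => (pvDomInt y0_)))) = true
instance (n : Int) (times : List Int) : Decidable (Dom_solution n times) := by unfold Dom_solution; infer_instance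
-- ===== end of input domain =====

-- B replaces A's binary search over the answer by a direct simulation on a leftist min-heap
-- of booth finish times (pop the earliest finish n times); both Pythons sort `times` in place
-- (same observable mutation) — the equivalence proved is about the return value.

-- ===== PORT A =====
-- sumNum accumulation: `sumNum += int(mid / time)`.  int(x/y) truncates toward zero; on the
-- inputs admitted by Pre_ every value stays below 2^53, where Python's float division is
-- exact, so Int.tdiv is the faithful port there.
def pvSumNum (mid : Int) (times : List Int) : Int :=
  times.foldl (fun s t => s + Int.tdiv mid t) 0

-- midpoint bounds, cited by pvLoopA for termination
theorem pvMidA_bounds (l r : Int) (hl : 0 ≤ l) (h : l < r) :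
    l ≤ Int.tdiv (l + r) 2 ∧ Int.tdiv (l + r) 2 < r := by
  rw [Int.tdiv_eq_ediv_of_nonneg (by omega)]
  omega

-- the `while left < right` loop of A (carries 0 ≤ left, an invariant of A's loop, for termination)
def pvLoopA (n : Int) (times : List Int) (left right : Int) (hl : 0 ≤ left) : Int :=
  if h : left < right then
    let mid := Int.tdiv (left + right) 2   -- mid = int((left+right)/2); exact s. Pre_
    if n ≤ pvSumNum mid times then
      pvLoopA n times left mid hl
    else
      pvLoopA n times (mid + 1) right (by have := pvMidA_bounds left right hl h; omega)
  else left
termination_by (right - left).toNat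
decreasing_by
  · have := pvMidA_bounds left right hl h; omega
  · have := pvMidA_bounds left right hl h; omega

def solution (n : Int) (times : List Int) : Int :=
  let ts := PySem.List.sorted times (fun x => x) false   -- times.sort() (in-place; return value unaffected)
  let right := (PySem.List.pyGetD ts (-1) 0) * n         -- times[-1] * n; IndexError on [] excluded by Pre_
  pvLoopA n ts 0 right (le_refl 0)

-- ===== PORT B =====
-- a leftist-heap node `(rank, finish, step, left, right)`; `None` is the empty heap
inductive PvHeap : Type
  | nil : PvHeap
  | node : Int → Int → Int → PvHeap → PvHeap → PvHeap
deriving DecidableEq, Repr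

def pvHeapSize : PvHeap → Nat
  | .nil => 0
  | .node _ _ _ l r => pvHeapSize l + pvHeapSize r + 1

-- `x[0] if x is not None else 0` on a heap
def pvRank : PvHeap → Int
  | .nil => 0
  | .node rk _ _ _ _ => rk

-- _merge(a, b): leftist-heap merge, keyed on the finish time (field 1)
def pvMerge : PvHeap → PvHeap → PvHeap
  | .nil, b => b
  | .node ra fa sa la ra2, .nil => .node ra fa sa la ra2
  | .node ra fa sa la ra2, .node rb fb sb lb rb2 =>
    if fb < fa then        -- a, b = b, a
      let left := lb
      let right := pvMerge rb2 (.node ra fa sa la ra2)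
      if pvRank left < pvRank right then .node (pvRank left + 1) fb sb right left
      else .node (pvRank right + 1) fb sb left right
    else
      let left := la
      let right := pvMerge ra2 (.node rb fb sb lb rb2)
      if pvRank left < pvRank right then .node (pvRank left + 1) fa sa right left
      else .node (pvRank right + 1) fa sa left right
termination_by a b => pvHeapSize a + pvHeapSize b
decreasing_by
  all_goals simp only [pvHeapSize]; omega

-- `for _ in range(n): …` pop loop; on an empty heap the Python raises (TypeError on
-- unpacking None), which Pre_ excludes (times ≠ []), so the .nil case is unreachable there
def pvPopLoop : Nat → PvHeap → Int → Int
  | 0, _, ans => ans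
  | _ + 1, .nil, ans => ans
  | k + 1, .node _ f s l r, _ =>
      pvPopLoop k (pvMerge (pvMerge l r) (.node 1 (f + s) s .nil .nil)) f

def solution_alt (n : Int) (times : List Int) : Int :=
  let ts := PySem.List.sorted times (fun x => x) false   -- times.sort()
  if n ≤ 0 then 0
  else
    let heap := ts.foldl (fun h t => pvMerge h (.node 1 t t .nil .nil)) .nil
    pvPopLoop n.toNat heap 0

-- ===== PRECONDITION & SPEC =====
-- Pre_ excludes: (i) empty `times` (A raises IndexError); (ii) when the search loop would run
-- (n > 0 with a positive maximum, or n < 0 with an all-negative list), lists containing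
-- nonpositive entries — there A either raises ZeroDivisionError (0 in times) or returns an
-- accidental value of its binary search over a NON-monotone predicate, unmatchable by any
-- natural counting/simulation implementation; (iii) times[-1]*n > 2^52, where Python's float
-- divisions int((left+right)/2) and int(mid/time) depart from exact integer division: A then
-- returns float-rounded values or loops forever (see cites), which no integer
-- re-implementation can match.  This bound is where A's float arithmetic is provably exact,
-- not a feasibility cap.
def Pre_solution (n : Int) (times : List Int) : Prop :=
  times ≠ [] ∧
    ((0 < n ∧ ∀ t ∈ times, 0 < t ∧ t * n ≤ 4503599627370496) ∨
     (n ≤ 0 ∧ (n = 0 ∨ ∃ t ∈ times, 0 ≤ t)))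
instance (n : Int) (times : List Int) : Decidable (Pre_solution n times) := by
  unfold Pre_solution; infer_instance

def pvWitness_solution : Int × List Int := (3, [1, 2])

def Spec_solution (n : Int) (times : List Int) (out : Int) : Prop := out = solution_alt n times
instance (n : Int) (times : List Int) (out : Int) : Decidable (Spec_solution n times out) := by
  unfold Spec_solution; infer_instance

-- ===== CLAIM (what is proved, stated in full; the proofs are below) =====
def Claim_equal_solution : Prop := ∀ (n : Int) (times : List Int), Dom_solution n times → Pre_solution n times → Spec_solution n times (solution n times)

-- ===== LEMMAS AND PROOFS =====

-- the mathematical count both programs probe: Σ T / t (Euclidean division; = Python // for t > 0)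
def pvCount (ts : List Int) (T : Int) : Int := (ts.map (fun t => T / t)).sum

theorem pvFoldl_add_map (f : Int → Int) (xs : List Int) (a : Int) :
    xs.foldl (fun s t => s + f t) a = a + (xs.map f).sum := by
  induction xs generalizing a with
  | nil => simp
  | cons x xs ih => simp [ih, add_assoc]

theorem pvSumNum_eq_count (ts : List Int) (T : Int) (hT : 0 ≤ T) :
    pvSumNum T ts = pvCount ts T := by
  unfold pvSumNum pvCount
  rw [pvFoldl_add_map, zero_add]
  congr 1
  exact List.map_congr_left (fun t _ => Int.tdiv_eq_ediv_of_nonneg hT)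

theorem pvCount_mono (ts : List Int) (hpos : ∀ t ∈ ts, 0 < t) {A B : Int} (hAB : A ≤ B) :
    pvCount ts A ≤ pvCount ts B := by
  induction ts with
  | nil => simp [pvCount]
  | cons x xs ih =>
      simp only [pvCount, List.map_cons, List.sum_cons]
      have hx := hpos x (by simp)
      exact add_le_add (Int.ediv_le_ediv hx hAB)
        (ih (fun t ht => hpos t (by simp [ht])))

theorem pvCount_nonneg (ts : List Int) (hpos : ∀ t ∈ ts, 0 < t) {T : Int} (hT : 0 ≤ T) :
    0 ≤ pvCount ts T := by
  induction ts with
  | nil => simp [pvCount]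
  | cons x xs ih =>
      simp only [pvCount, List.map_cons, List.sum_cons]
      have hx := hpos x (by simp)
      have h1 : 0 ≤ T / x := Int.ediv_nonneg hT (le_of_lt hx)
      have h2 := ih (fun t ht => hpos t (by simp [ht]))
      simp only [pvCount] at h2
      omega

theorem pvCount_lb (ts : List Int) (m n : Int) (hm : m ∈ ts) (hpos : ∀ t ∈ ts, 0 < t)
    (hn : 0 < n) : n ≤ pvCount ts (m * n) := by
  have hmpos : 0 < m := hpos m hm
  have hT : 0 ≤ m * n := mul_nonneg (le_of_lt hmpos) (le_of_lt hn)
  induction ts with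
  | nil => simp at hm
  | cons x xs ih =>
      simp only [pvCount, List.map_cons, List.sum_cons]
      have hx := hpos x (by simp)
      rcases List.mem_cons.mp hm with h | h
      · subst h
        have hself : m * n / m = n := by
          rw [mul_comm]; exact Int.mul_ediv_cancel n (ne_of_gt hmpos)
        have hrest : 0 ≤ pvCount xs (m * n) :=
          pvCount_nonneg xs (fun t ht => hpos t (by simp [ht])) hT
        simp only [pvCount] at hrest
        omega
      · have h1 : 0 ≤ m * n / x := Int.ediv_nonneg hT (le_of_lt hx)
        have h2 := ih h (fun t ht => hpos t (by simp [ht]))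
        simp only [pvCount] at h2
        omega

theorem pvPairwise_le_getLast : ∀ (l : List Int) (h : l ≠ []), l.Pairwise (· ≤ ·) →
    ∀ x ∈ l, x ≤ l.getLast h
  | [a], _, _, x, hx => by
      simp only [List.mem_singleton] at hx
      simp [hx]
  | a :: b :: t, h, hp, x, hx => by
      rw [List.getLast_cons (by simp)]
      rcases List.mem_cons.mp hx with rfl | hx'
      · exact List.rel_of_pairwise_cons hp (List.getLast_mem (by simp))
      · exact pvPairwise_le_getLast (b :: t) (by simp) hp.of_cons x hx'

-- A's loop returns the least T ≥ 0 with n ≤ pvCount ts T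
theorem pvLoopA_spec (n : Int) (ts : List Int) (hpos : ∀ t ∈ ts, 0 < t)
    (l r : Int) (hl : 0 ≤ l) :
    l ≤ r → (∀ T, 0 ≤ T → T < l → pvCount ts T < n) → n ≤ pvCount ts r →
    0 ≤ pvLoopA n ts l r hl ∧ n ≤ pvCount ts (pvLoopA n ts l r hl) ∧
      (∀ T, 0 ≤ T → T < pvLoopA n ts l r hl → pvCount ts T < n) := by
  fun_induction pvLoopA n ts l r hl with
  | case1 left right hl h mid hguard ih =>
      intro hlr hbelow hr
      have hb := pvMidA_bounds left right hl h
      have hmid0 : 0 ≤ mid := by omega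
      rw [pvSumNum_eq_count ts mid hmid0] at hguard
      exact ih hb.1 hbelow hguard
  | case2 left right hl h mid hguard ih =>
      intro hlr hbelow hr
      rw [pvSumNum_eq_count ts mid (by have := pvMidA_bounds left right hl h; omega)] at hguard
      have hb := pvMidA_bounds left right hl h
      refine ih (by omega) ?_ hr
      intro T hT0 hTlt
      by_cases hTl : T < left
      · exact hbelow T hT0 hTl
      · have : pvCount ts T ≤ pvCount ts mid := pvCount_mono ts hpos (by omega)
        omega
  | case3 left right hl h =>
      intro hlr hbelow hr
      have : left = right := by omega
      subst this
      exact ⟨hl, hr, hbelow⟩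

-- ---- B-side: leftist-heap lemmas ----

-- the multiset of (finish, step) pairs a heap holds
def pvMS : PvHeap → Multiset (Int × Int)
  | .nil => 0
  | .node _ f s l r => (f, s) ::ₘ (pvMS l + pvMS r)

-- min-heap property on the finish keys
def pvHP : PvHeap → Prop
  | .nil => True
  | .node _ f _ l r =>
      (∀ p ∈ pvMS l, f ≤ p.1) ∧ (∀ p ∈ pvMS r, f ≤ p.1) ∧ pvHP l ∧ pvHP r

theorem pvHP_root_le (rk f s : Int) (l r : PvHeap) (h : pvHP (.node rk f s l r)) :
    ∀ p ∈ pvMS (.node rk f s l r), f ≤ p.1 := by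
  obtain ⟨hl, hr, _, _⟩ := h
  intro p hp
  simp only [pvMS, Multiset.mem_cons, Multiset.mem_add] at hp
  rcases hp with rfl | hp | hp
  · exact le_refl _
  · exact hl p hp
  · exact hr p hp

theorem pvMerge_ms (a b : PvHeap) : pvMS (pvMerge a b) = pvMS a + pvMS b := by
  fun_induction pvMerge a b with
  | case1 b => simp [pvMS]
  | case2 ra fa sa la ra2 => simp [pvMS]
  | case3 ra fa sa la ra2 rb fb sb lb rb2 hcond lf rt hifc IH =>
      simp only [show lf = lb from rfl,
        show rt = pvMerge rb2 (PvHeap.node ra fa sa la ra2) from rfl] at *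
      refine Multiset.ext.mpr fun x => ?_
      simp [pvMS, IH, Multiset.count_cons, Multiset.count_add]
      ring
  | case4 ra fa sa la ra2 rb fb sb lb rb2 hcond lf rt hifc IH =>
      simp only [show lf = lb from rfl,
        show rt = pvMerge rb2 (PvHeap.node ra fa sa la ra2) from rfl] at *
      refine Multiset.ext.mpr fun x => ?_
      simp [pvMS, IH, Multiset.count_cons, Multiset.count_add]
      ring
  | case5 ra fa sa la ra2 rb fb sb lb rb2 hcond lf rt hifc IH =>
      simp only [show lf = la from rfl,
        show rt = pvMerge ra2 (PvHeap.node rb fb sb lb rb2) from rfl] at *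
      refine Multiset.ext.mpr fun x => ?_
      simp [pvMS, IH, Multiset.count_cons, Multiset.count_add]
      ring
  | case6 ra fa sa la ra2 rb fb sb lb rb2 hcond lf rt hifc IH =>
      simp only [show lf = la from rfl,
        show rt = pvMerge ra2 (PvHeap.node rb fb sb lb rb2) from rfl] at *
      refine Multiset.ext.mpr fun x => ?_
      simp [pvMS, IH, Multiset.count_cons, Multiset.count_add]
      ring

theorem pvMerge_hp (a b : PvHeap) (ha : pvHP a) (hb : pvHP b) : pvHP (pvMerge a b) := by
  fun_induction pvMerge a b with
  | case1 b => exact hb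
  | case2 ra fa sa la ra2 => exact ha
  | case3 ra fa sa la ra2 rb fb sb lb rb2 hcond lf rt hifc IH =>
      simp only [show lf = lb from rfl,
        show rt = pvMerge rb2 (PvHeap.node ra fa sa la ra2) from rfl] at *
      obtain ⟨hbl, hbr, hbL, hbR⟩ := hb
      have hup : ∀ p ∈ pvMS (pvMerge rb2 (PvHeap.node ra fa sa la ra2)), fb ≤ p.1 := by
        intro p hp
        rw [pvMerge_ms] at hp
        rcases Multiset.mem_add.mp hp with hp | hp
        · exact hbr p hp
        · exact le_of_lt (lt_of_lt_of_le hcond (pvHP_root_le ra fa sa la ra2 ha p hp))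
      exact ⟨hup, hbl, IH hbR ha, hbL⟩
  | case4 ra fa sa la ra2 rb fb sb lb rb2 hcond lf rt hifc IH =>
      simp only [show lf = lb from rfl,
        show rt = pvMerge rb2 (PvHeap.node ra fa sa la ra2) from rfl] at *
      obtain ⟨hbl, hbr, hbL, hbR⟩ := hb
      have hup : ∀ p ∈ pvMS (pvMerge rb2 (PvHeap.node ra fa sa la ra2)), fb ≤ p.1 := by
        intro p hp
        rw [pvMerge_ms] at hp
        rcases Multiset.mem_add.mp hp with hp | hp
        · exact hbr p hp
        · exact le_of_lt (lt_of_lt_of_le hcond (pvHP_root_le ra fa sa la ra2 ha p hp))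
      exact ⟨hbl, hup, hbL, IH hbR ha⟩
  | case5 ra fa sa la ra2 rb fb sb lb rb2 hcond lf rt hifc IH =>
      simp only [show lf = la from rfl,
        show rt = pvMerge ra2 (PvHeap.node rb fb sb lb rb2) from rfl] at *
      obtain ⟨hal, har, haL, haR⟩ := ha
      have hup : ∀ p ∈ pvMS (pvMerge ra2 (PvHeap.node rb fb sb lb rb2)), fa ≤ p.1 := by
        intro p hp
        rw [pvMerge_ms] at hp
        rcases Multiset.mem_add.mp hp with hp | hp
        · exact har p hp
        · exact le_trans (by omega) (pvHP_root_le rb fb sb lb rb2 hb p hp)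
      exact ⟨hup, hal, IH haR hb, haL⟩
  | case6 ra fa sa la ra2 rb fb sb lb rb2 hcond lf rt hifc IH =>
      simp only [show lf = la from rfl,
        show rt = pvMerge ra2 (PvHeap.node rb fb sb lb rb2) from rfl] at *
      obtain ⟨hal, har, haL, haR⟩ := ha
      have hup : ∀ p ∈ pvMS (pvMerge ra2 (PvHeap.node rb fb sb lb rb2)), fa ≤ p.1 := by
        intro p hp
        rw [pvMerge_ms] at hp
        rcases Multiset.mem_add.mp hp with hp | hp
        · exact har p hp
        · exact le_trans (by omega) (pvHP_root_le rb fb sb lb rb2 hb p hp)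
      exact ⟨hal, hup, haL, IH haR hb⟩

-- the heap built by B's first loop holds exactly the pairs (t, t)
theorem pvInit_ms (ts : List Int) (h : PvHeap) :
    pvMS (ts.foldl (fun h t => pvMerge h (.node 1 t t .nil .nil)) h)
      = pvMS h + ↑(ts.map fun t => (t, t)) := by
  induction ts generalizing h with
  | nil => simp
  | cons x xs ih =>
      simp only [List.foldl_cons, List.map_cons, ih, pvMerge_ms]
      have hsingle : pvMS (PvHeap.node 1 x x .nil .nil) = {(x, x)} := rfl
      rw [hsingle, add_assoc, Multiset.singleton_add]
      simp

theorem pvInit_hp (ts : List Int) (h : PvHeap) (hh : pvHP h) :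
    pvHP (ts.foldl (fun h t => pvMerge h (.node 1 t t .nil .nil)) h) := by
  induction ts generalizing h with
  | nil => exact hh
  | cons x xs ih =>
      exact ih _ (pvMerge_hp _ _ hh (by simp [pvHP, pvMS]))

-- pointwise bound on multiset sums (used to compare pvCount with the heap's fill levels)
theorem pvSum_map_le {α : Type} (s : Multiset α) (f g : α → Int)
    (h : ∀ x ∈ s, f x ≤ g x) : (s.map f).sum ≤ (s.map g).sum := by
  induction s using Multiset.induction with
  | empty => simp
  | cons a s ih =>
      simp only [Multiset.map_cons, Multiset.sum_cons]
      exact add_le_add (h a (Multiset.mem_cons_self a s))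
        (ih fun x hx => h x (Multiset.mem_cons_of_mem hx))

-- Σ (f/s - 1) over a multiset, as a sum minus a cardinality
theorem pvSum_sub (M : Multiset (Int × Int)) :
    (M.map fun p => p.1 / p.2 - 1).sum = (M.map fun p => p.1 / p.2).sum - M.card := by
  induction M using Multiset.induction with
  | empty => simp
  | cons a s ih =>
      simp only [Multiset.map_cons, Multiset.sum_cons, Multiset.card_cons, ih]
      push_cast
      ring

-- pvCount through the heap's multiset of steps
theorem pvCount_of_ms (ts : List Int) (M : Multiset (Int × Int))
    (hsnd : M.map Prod.snd = (↑ts : Multiset Int)) (T : Int) :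
    (M.map fun p => T / p.2).sum = pvCount ts T := by
  have : (M.map fun p => T / p.2) = (M.map Prod.snd).map fun t => T / t := by
    rw [Multiset.map_map]; rfl
  rw [this, hsnd]
  show ((ts : Multiset Int).map fun t => T / t).sum = _
  rw [Multiset.map_coe, Multiset.sum_coe]
  rfl

-- the simulation loop invariant: after i pops with state (h, ans), popping k more times
-- ends at the unique T with pvCount ts (T-1) < i+k ≤ pvCount ts T
theorem pvPopLoop_spec (ts : List Int) (hne : ts ≠ []) :
    ∀ (k : ℕ) (h : PvHeap) (ans i : Int),
    (pvMS h).map Prod.snd = (↑ts : Multiset Int) →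
    (∀ p ∈ pvMS h, 0 < p.2 ∧ p.2 ∣ p.1 ∧ p.2 ≤ p.1) →
    ((pvMS h).map fun p => p.1 / p.2).sum = i + ts.length →
    (∀ p ∈ pvMS h, ans ≤ p.1) →
    (∀ p ∈ pvMS h, p.1 - p.2 ≤ ans) →
    (∃ p ∈ pvMS h, p.1 - p.2 = ans) →
    pvHP h →
    0 ≤ ans → (1 ≤ i → 1 ≤ ans) →
    (1 ≤ i + k → 1 ≤ pvPopLoop k h ans) ∧ 0 ≤ pvPopLoop k h ans ∧
      i + k ≤ pvCount ts (pvPopLoop k h ans) ∧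
      pvCount ts (pvPopLoop k h ans - 1) < i + k := by
  intro k
  induction k with
  | zero =>
      intro h ans i hsnd helem hsum hub hlb hw hhp h0 h1
      refine ⟨fun hik => h1 (by omega), h0, ?_, ?_⟩
      · -- i ≤ pvCount ts ans : per element ans/s ≥ f/s - 1
        have hper : ∀ p ∈ pvMS h, p.1 / p.2 - 1 ≤ ans / p.2 := by
          intro p hp
          obtain ⟨hs, ⟨q, hq⟩, _⟩ := helem p hp
          have h2 : p.1 - p.2 ≤ ans := hlb p hp
          have hmono : (p.1 - p.2) / p.2 ≤ ans / p.2 := Int.ediv_le_ediv hs h2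
          have h3 : (p.1 - p.2) / p.2 = q - 1 := by
            rw [hq]
            have he : p.2 * q - p.2 = p.2 * (q - 1) := by ring
            rw [he, Int.mul_ediv_cancel_left _ (ne_of_gt hs)]
          have h4 : p.1 / p.2 = q := by rw [hq, Int.mul_ediv_cancel_left _ (ne_of_gt hs)]
          omega
        have hle := pvSum_map_le (pvMS h) (fun p => p.1 / p.2 - 1) (fun p => ans / p.2) hper
        have hsub := pvSum_sub (pvMS h)
        have hcard : ((pvMS h).card : Int) = ts.length := by
          have := congrArg Multiset.card hsnd
          simpa using this
        have hC := pvCount_of_ms ts (pvMS h) hsnd ans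
        simp only [pvPopLoop]
        push_cast
        omega
      · -- pvCount ts (ans-1) < i : the witness element drops by 2, the rest by ≥ 1
        obtain ⟨w, hwmem, hwans⟩ := hw
        obtain ⟨M', hM'⟩ := Multiset.exists_cons_of_mem hwmem
        have hper : ∀ p ∈ pvMS h, (ans - 1) / p.2 ≤ p.1 / p.2 - 1 := by
          intro p hp
          obtain ⟨hs, ⟨q, hq⟩, _⟩ := helem p hp
          have h2 : ans ≤ p.1 := hub p hp
          have hmono : (ans - 1) / p.2 ≤ (p.1 - 1) / p.2 := Int.ediv_le_ediv hs (by omega)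
          have h3 : (p.1 - 1) / p.2 = q - 1 := by
            rw [hq]
            have h5 : p.2 * q - 1 = (p.2 - 1) + p.2 * (q - 1) := by ring
            rw [h5, Int.add_mul_ediv_left _ _ (ne_of_gt hs),
              Int.ediv_eq_zero_of_lt (by omega) (by omega)]
            omega
          have h4 : p.1 / p.2 = q := by rw [hq, Int.mul_ediv_cancel_left _ (ne_of_gt hs)]
          omega
        have hwdrop : (ans - 1) / w.2 ≤ w.1 / w.2 - 2 := by
          obtain ⟨hs, ⟨q, hq⟩, _⟩ := helem w hwmem
          have h4 : w.1 / w.2 = q := by rw [hq, Int.mul_ediv_cancel_left _ (ne_of_gt hs)]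
          have h5 : ans - 1 = (w.2 - 1) + w.2 * (q - 2) := by
            rw [← hwans, hq]; ring
          rw [h5, Int.add_mul_ediv_left _ _ (ne_of_gt hs),
            Int.ediv_eq_zero_of_lt (by omega) (by omega)]
          omega
        have hrest := pvSum_map_le M' (fun p => (ans - 1) / p.2) (fun p => p.1 / p.2 - 1)
          (fun p hp => hper p (by rw [hM']; exact Multiset.mem_cons_of_mem hp))
        have hsub := pvSum_sub M'
        have hcard : ((pvMS h).card : Int) = ts.length := by
          have := congrArg Multiset.card hsnd
          simpa using this
        have hC := pvCount_of_ms ts (pvMS h) hsnd (ans - 1)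
        rw [hM'] at hC hsum hcard
        simp only [Multiset.map_cons, Multiset.sum_cons, Multiset.card_cons] at hC hsum hcard
        simp only [pvPopLoop]
        push_cast at hcard ⊢
        omega
  | succ k ih =>
      intro h ans i hsnd helem hsum hub hlb hw hhp h0 h1
      cases h with
      | nil =>
          exfalso
          have : (↑ts : Multiset Int) = 0 := by rw [← hsnd]; simp [pvMS]
          exact hne (by simpa using this)
      | node rk f s l r =>
          have hself : (f, s) ∈ pvMS (.node rk f s l r) := by simp [pvMS]
          obtain ⟨hs, hdvd, hfs⟩ := helem _ hself
          have hansf : ans ≤ f := hub _ hself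
          obtain ⟨hl', hr', hlhp, hrhp⟩ := hhp
          have hmsh : pvMS (.node rk f s l r) = (f, s) ::ₘ (pvMS l + pvMS r) := rfl
          have hms' : pvMS (pvMerge (pvMerge l r) (.node 1 (f + s) s .nil .nil))
              = (f + s, s) ::ₘ (pvMS l + pvMS r) := by
            rw [pvMerge_ms, pvMerge_ms]
            refine Multiset.ext.mpr fun y => ?_
            simp [pvMS, Multiset.count_cons, Multiset.count_add, Multiset.count_singleton]
          have hroot : ∀ p ∈ pvMS l + pvMS r, f ≤ p.1 := by
            intro p hp
            rcases Multiset.mem_add.mp hp with hp | hp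
            · exact hl' p hp
            · exact hr' p hp
          have hdivsucc : (f + s) / s = f / s + 1 := by
            have hfe : f + s = f + s * 1 := by ring
            rw [hfe, Int.add_mul_ediv_left f 1 (ne_of_gt hs)]
          have H := ih (pvMerge (pvMerge l r) (.node 1 (f + s) s .nil .nil)) f (i + 1)
            (by
              rw [hms']
              rw [hmsh] at hsnd
              simpa using hsnd)
            (by
              intro p hp
              rw [hms'] at hp
              rcases Multiset.mem_cons.mp hp with rfl | hp
              · exact ⟨hs, hdvd.add (dvd_refl s), by omega⟩
              · exact helem p (by rw [hmsh]; exact Multiset.mem_cons_of_mem hp))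
            (by
              rw [hms'] at *
              rw [hmsh] at hsum
              simp only [Multiset.map_cons, Multiset.sum_cons] at hsum ⊢
              omega)
            (by
              intro p hp
              rw [hms'] at hp
              rcases Multiset.mem_cons.mp hp with rfl | hp
              · simp; omega
              · exact hroot p hp)
            (by
              intro p hp
              rw [hms'] at hp
              rcases Multiset.mem_cons.mp hp with rfl | hp
              · simp
              · have := hlb p (by rw [hmsh]; exact Multiset.mem_cons_of_mem hp)
                omega)
            ⟨(f + s, s), by rw [hms']; exact Multiset.mem_cons_self _ _, by simp⟩
            (pvMerge_hp _ _ (pvMerge_hp _ _ hlhp hrhp)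
              (by exact ⟨by simp [pvMS], by simp [pvMS], trivial, trivial⟩))
            (by omega) (by intro _; omega)
          simp only [pvPopLoop]
          push_cast at H ⊢
          exact ⟨by intro hik; exact H.1 (by omega), H.2.1, by have := H.2.2.1; omega,
            by have := H.2.2.2; omega⟩

-- ===== VERDICT (by name: the statement is the Claim_ definition above) =====
-- Σ t/t over a list of nonzero entries is its length
theorem pvSum_self (ts : List Int) (hnz : ∀ t ∈ ts, t ≠ 0) :
    (ts.map fun t => t / t).sum = (ts.length : Int) := by
  induction ts with
  | nil => simp
  | cons x xs ih =>
      simp only [List.map_cons, List.sum_cons, List.length_cons]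
      rw [Int.ediv_self (hnz x (by simp)), ih (fun t ht => hnz t (by simp [ht]))]
      push_cast
      ring

theorem solution_spec : Claim_equal_solution := by
  intro n times _ hpre
  obtain ⟨hne, hrest⟩ := hpre
  unfold Spec_solution solution solution_alt
  have hperm : (PySem.List.sorted times (fun x => x) false).Perm times :=
    PySem.List.sorted_perm times (fun x => x) false
  set ts := PySem.List.sorted times (fun x => x) false with hts
  have hmem : ∀ x, x ∈ ts ↔ x ∈ times := fun x => hperm.mem_iff
  have htsne : ts ≠ [] := by
    intro hnil
    have hlen := hperm.length_eq
    rw [hnil] at hlen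
    exact hne (List.eq_nil_of_length_eq_zero hlen.symm)
  have hM : PySem.List.pyGetD ts (-1) (0:Int) = ts.getLast htsne :=
    PySem.List.pyGetD_neg_one ts 0 htsne
  simp only [hM]
  set m := ts.getLast htsne with hm
  have hmmem : m ∈ ts := List.getLast_mem htsne
  rcases hrest with ⟨hn, hall⟩ | ⟨hn, hcase⟩
  · -- n > 0, all entries positive: A's binary search and B's simulation meet at the
    -- unique T with pvCount ts (T-1) < n ≤ pvCount ts T
    rw [if_neg (by omega : ¬ n ≤ 0)]
    show pvLoopA n ts 0 (m * n) (le_refl 0) =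
      pvPopLoop n.toNat (ts.foldl (fun h t => pvMerge h (.node 1 t t .nil .nil)) .nil) 0
    have hpos : ∀ t ∈ ts, 0 < t := fun t ht => (hall t ((hmem t).mp ht)).1
    have hmpos : 0 < m := hpos m hmmem
    obtain ⟨hA0, hAge, hAbelow⟩ :=
      pvLoopA_spec n ts hpos 0 (m * n) (le_refl 0)
        (mul_nonneg (le_of_lt hmpos) (le_of_lt hn))
        (by intro T hT0 hTlt; omega) (pvCount_lb ts m n hmmem hpos hn)
    set H0 := ts.foldl (fun h t => pvMerge h (.node 1 t t .nil .nil)) PvHeap.nil with hH0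
    have hms0 : pvMS H0 = ↑(ts.map fun t => (t, t)) := by
      rw [hH0, pvInit_ms]
      simp [pvMS]
    have hmem0 : ∀ p, p ∈ pvMS H0 → ∃ t ∈ ts, p = (t, t) := by
      intro p hp
      rw [hms0] at hp
      obtain ⟨t, ht, rfl⟩ := List.mem_map.mp (Multiset.mem_coe.mp hp)
      exact ⟨t, ht, rfl⟩
    have hkn : (n.toNat : Int) = n := Int.toNat_of_nonneg (le_of_lt hn)
    obtain ⟨hR1, hR0, hRge, hRlt⟩ :=
      pvPopLoop_spec ts htsne n.toNat H0 0 0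
        (by
          rw [hms0, Multiset.map_coe, List.map_map]
          have hc : (Prod.snd ∘ fun t : Int => (t, t)) = id := rfl
          rw [hc, List.map_id])
        (by
          intro p hp
          obtain ⟨t, ht, rfl⟩ := hmem0 p hp
          exact ⟨hpos t ht, dvd_refl t, le_refl t⟩)
        (by
          rw [hms0, Multiset.map_coe, Multiset.sum_coe, List.map_map]
          have : ((ts.map fun t => (t, t)).map fun p => p.1 / p.2) = ts.map fun t => t / t := by
            simp [Function.comp]
          rw [← List.map_map]
          rw [this, pvSum_self ts (fun t ht => ne_of_gt (hpos t ht))]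
          ring)
        (by
          intro p hp
          obtain ⟨t, ht, rfl⟩ := hmem0 p hp
          exact le_of_lt (hpos t ht))
        (by
          intro p hp
          obtain ⟨t, ht, rfl⟩ := hmem0 p hp
          simp)
        (by
          obtain ⟨t0, rest, hcons⟩ := List.exists_cons_of_ne_nil htsne
          refine ⟨(t0, t0), ?_, by simp⟩
          rw [hms0]
          refine Multiset.mem_coe.mpr (List.mem_map.mpr ⟨t0, ?_, rfl⟩)
          rw [hcons]
          simp)
        (pvInit_hp ts .nil trivial)
        (le_refl 0) (by intro h; omega)
    rw [hkn] at hRge hRlt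
    set R := pvPopLoop n.toNat H0 0 with hR
    set A := pvLoopA n ts 0 (m * n) (le_refl 0) with hA
    have h1 : A ≤ R := by
      by_contra hc
      rw [not_le] at hc
      have := hAbelow R hR0 hc
      omega
    have h2 : R ≤ A := by
      by_contra hc
      rw [not_le] at hc
      have hmono : pvCount ts A ≤ pvCount ts (R - 1) := pvCount_mono ts hpos (by omega)
      omega
    omega
  · -- n ≤ 0: both return 0
    rw [if_pos hn]
    show pvLoopA n ts 0 (m * n) (le_refl 0) = 0
    have hm0 : m * n ≤ 0 := by
      rcases hcase with rfl | ⟨t, ht, ht0⟩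
      · simp
      · have hpw : ts.Pairwise (· ≤ ·) := by
          have := PySem.List.sorted_pairwise (xs := times) (key := fun x => x)
          simpa [hts] using this
        have htm : t ≤ m := pvPairwise_le_getLast ts htsne hpw t ((hmem t).mpr ht)
        exact mul_nonpos_of_nonneg_of_nonpos (by omega) hn
    rw [pvLoopA]
    rw [dif_neg (by omega : ¬ (0:Int) < m * n)]
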